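-- pv_equiv track=rewrite | github.com/shang-lin/google_code_jam | 2016/round1a/lastword/lastword.py | find_winning_word
-- ===== SOURCE A (Python) =====
-- def find_winning_word(S):
--     new_word = S[0]
--     for c in S[1:]:
--         if c < new_word[0]:
--             new_word += c
--         else:
--             new_word = c + new_word
--     return new_word
-- ===== SOURCE B (Python) =====
-- def find_winning_word(S):
--     # Stage 1: table of prefix maxima, prefix_max[i] == max(S[:i+1]).
--     prefix_max = []
--     for c in S:
--         if prefix_max and prefix_max[-1] > c:
--             prefix_max.append(prefix_max[-1])
--         else:
--             prefix_max.append(c)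
--     # Stage 2: a char belongs up front exactly when it equals its prefix maximum.
--     records = [c for c, m in zip(S, prefix_max) if c == m]
--     others = [c for c, m in zip(S, prefix_max) if c != m]
--     return ''.join(records[::-1] + others)
-- ===== Notes on version B (the rewrite author's own statement) =====
-- stated objective: faster
-- what changed: B replaces A's single growing string (prepend/append against its first char) by two staged passes: it first builds a table of prefix maxima, then selects the chars equal to their prefix maximum (reversed, to the front) and the rest (in order, to the back), avoiding repeated string concatenation.
import Mathlib
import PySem

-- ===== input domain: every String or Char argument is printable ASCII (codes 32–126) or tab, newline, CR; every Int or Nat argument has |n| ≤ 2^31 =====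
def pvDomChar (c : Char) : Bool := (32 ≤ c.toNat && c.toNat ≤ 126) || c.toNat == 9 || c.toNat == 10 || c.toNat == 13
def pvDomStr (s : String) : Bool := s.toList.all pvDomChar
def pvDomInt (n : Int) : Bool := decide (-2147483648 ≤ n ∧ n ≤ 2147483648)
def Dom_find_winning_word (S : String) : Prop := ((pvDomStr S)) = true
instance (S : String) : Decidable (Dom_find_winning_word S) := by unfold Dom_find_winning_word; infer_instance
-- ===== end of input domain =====

-- B stages the work: a prefix-maximum table, then selection of the chars equal to
-- their prefix maximum (reversed) ahead of the rest, instead of A's growing string.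


-- ===== PORT A =====
-- A's loop: new_word grows by append (c < new_word[0]) or prepend (otherwise).
def fwwLoopA : List Char → List Char → List Char
  | nw, [] => nw
  | nw, c :: rest =>
    if c < nw.headD ' ' then fwwLoopA (nw ++ [c]) rest
    else fwwLoopA (c :: nw) rest

def find_winning_word (S : String) : String :=
  match S.toList with
  | [] => ""          -- S[0] raises IndexError in Python; excluded by Pre_
  | h :: t => String.ofList (fwwLoopA [h] t)

-- ===== PORT B =====
-- Stage 1 of Source B: the prefix-maximum table, built by appending to a list.
def fwwPrefixMax (l : List Char) : List Char :=
  l.foldl (fun P c =>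
    match P.getLast? with
    | some m => if m > c then P ++ [m] else P ++ [c]
    | none => P ++ [c]) []

def find_winning_word_alt (S : String) : String :=
  let P := fwwPrefixMax S.toList
  let records := ((S.toList.zip P).filter (fun p => p.1 == p.2)).map Prod.fst
  let others := ((S.toList.zip P).filter (fun p => p.1 != p.2)).map Prod.fst
  String.ofList (records.reverse ++ others)

-- ===== PRECONDITION & SPEC =====
-- Pre_ excludes only the empty string, on which A raises IndexError (S[0]).
def Pre_find_winning_word (S : String) : Prop := S ≠ ""
instance (S : String) : Decidable (Pre_find_winning_word S) := by unfold Pre_find_winning_word; infer_instance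
def pvWitness_find_winning_word : String := "CAB"

def Spec_find_winning_word (S : String) (out : String) : Prop := out = find_winning_word_alt S
instance (S : String) (out : String) : Decidable (Spec_find_winning_word S out) := by unfold Spec_find_winning_word; infer_instance

-- ===== CLAIM (what is proved, stated in full; the proofs are below) =====
def Claim_equal_find_winning_word : Prop := ∀ (S : String), Dom_find_winning_word S → Pre_find_winning_word S → Spec_find_winning_word S (find_winning_word S)

-- ===== LEMMAS AND PROOFS =====

-- Reference splitter used only by the proofs: given the running maximum m,
-- refSplit m rest = (chars ≥ their prefix max, the remaining chars), each in order.
def refSplit : Char → List Char → List Char × List Char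
  | _, [] => ([], [])
  | m, c :: rest =>
    if c < m then
      let p := refSplit m rest; (p.1, c :: p.2)
    else
      let p := refSplit c rest; (c :: p.1, p.2)

-- Simple-recursion version of the prefix-maximum table continuing from maximum m.
def pmaxFrom : Char → List Char → List Char
  | _, [] => []
  | m, c :: rest => if m > c then m :: pmaxFrom m rest else c :: pmaxFrom c rest

theorem headD_append_ne_nil {l : List Char} (hl : l ≠ []) {m : List Char} :
    (l ++ m).headD ' ' = l.headD ' ' := by
  cases l with
  | nil => exact absurd rfl hl
  | cons a t => simp

-- A's loop in terms of refSplit: invariant nw = recs.reverse ++ others, head nw = m.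
theorem loopA_ref (rest : List Char) : ∀ (recs others : List Char) (m : Char),
    recs ≠ [] → (recs.reverse ++ others).headD ' ' = m →
    fwwLoopA (recs.reverse ++ others) rest
      = (recs ++ (refSplit m rest).1).reverse ++ (others ++ (refSplit m rest).2) := by
  induction rest with
  | nil => intro recs others m _ _; simp [fwwLoopA, refSplit]
  | cons c rest ih =>
    intro recs others m hne hhead
    have hrev : recs.reverse ≠ [] := by simpa using hne
    simp only [fwwLoopA, hhead, refSplit]
    by_cases hc : c < m
    · rw [if_pos hc, if_pos hc]
      have hassoc : recs.reverse ++ others ++ [c] = recs.reverse ++ (others ++ [c]) := by simp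
      have hh2 : (recs.reverse ++ (others ++ [c])).headD ' ' = m := by
        rwa [headD_append_ne_nil hrev, ← headD_append_ne_nil hrev (m := others)]
      rw [hassoc, ih recs (others ++ [c]) m hne hh2]
      simp
    · rw [if_neg hc, if_neg hc]
      have hassoc : c :: (recs.reverse ++ others) = (recs ++ [c]).reverse ++ others := by simp
      rw [hassoc, ih (recs ++ [c]) others c (by simp) (by simp)]
      simp

-- B's stage 1 (foldl with getLast?) equals the simple recursion pmaxFrom.
theorem prefixMax_fold (t : List Char) : ∀ (acc : List Char) (m : Char),
    acc.getLast? = some m →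
    t.foldl (fun P c =>
      match P.getLast? with
      | some m => if m > c then P ++ [m] else P ++ [c]
      | none => P ++ [c]) acc = acc ++ pmaxFrom m t := by
  induction t with
  | nil => intro acc m _; simp [pmaxFrom]
  | cons c rest ih =>
    intro acc m hlast
    simp only [List.foldl, hlast, pmaxFrom]
    by_cases hmc : m > c
    · rw [if_pos hmc, if_pos hmc, ih (acc ++ [m]) m (by simp)]; simp
    · rw [if_neg hmc, if_neg hmc, ih (acc ++ [c]) c (by simp)]; simp

theorem fwwPrefixMax_cons (h : Char) (t : List Char) :
    fwwPrefixMax (h :: t) = h :: pmaxFrom h t := by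
  unfold fwwPrefixMax
  simp only [List.foldl]
  have := prefixMax_fold t [h] h (by simp)
  simpa using this

-- B's stage 2 (filters over zip with the table) computes refSplit.
theorem zipFilter_ref (t : List Char) : ∀ (m : Char),
    (((t.zip (pmaxFrom m t)).filter (fun p => p.1 == p.2)).map Prod.fst,
     ((t.zip (pmaxFrom m t)).filter (fun p => p.1 != p.2)).map Prod.fst)
      = refSplit m t := by
  induction t with
  | nil => intro m; simp [pmaxFrom, refSplit]
  | cons c rest ih =>
    intro m
    by_cases hmc : m > c
    · have hne : (c == m) = false := by
        have : c ≠ m := ne_of_lt hmc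
        simpa using this
      rw [show pmaxFrom m (c :: rest) = m :: pmaxFrom m rest from by simp [pmaxFrom, hmc]]
      rw [show refSplit m (c :: rest) = ((refSplit m rest).1, c :: (refSplit m rest).2) from by
        simp [refSplit, hmc]]
      rw [← ih m]
      simp [hne, ne_of_lt hmc]
    · have hc : ¬ c < m := hmc
      rw [show pmaxFrom m (c :: rest) = c :: pmaxFrom c rest from by simp [pmaxFrom, hmc]]
      rw [show refSplit m (c :: rest) = (c :: (refSplit c rest).1, (refSplit c rest).2) from by
        simp [refSplit, hc]]
      rw [← ih c]
      simp

theorem find_winning_word_eq (S : String) (h : S ≠ "") :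
    find_winning_word S = find_winning_word_alt S := by
  unfold find_winning_word find_winning_word_alt
  have hne : S.toList ≠ [] := by simpa using h
  cases hS : S.toList with
  | nil => exact absurd hS hne
  | cons hd tl =>
    refine congrArg String.ofList ?_
    have hA := loopA_ref tl [hd] [] hd (by simp) (by simp)
    simp only [List.reverse_singleton, List.nil_append, List.append_nil] at hA
    have hB := zipFilter_ref tl hd
    rcases hq : refSplit hd tl with ⟨r, o⟩
    rw [hq] at hA hB
    rw [Prod.mk.injEq] at hB
    rw [fwwPrefixMax_cons, List.zip_cons_cons, List.filter_cons, List.filter_cons]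
    simp only [beq_self_eq_true, bne_self_eq_false, if_true, Bool.false_eq_true, if_false,
      List.map_cons]
    rw [hB.1, hB.2, hA]
    simp

-- ===== VERDICT (by name: the statement is the Claim_ definition above) =====
theorem find_winning_word_spec : Claim_equal_find_winning_word := by
  intro S _ hpre
  exact find_winning_word_eq S hpre
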